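-- pv_equiv track=rewrite | github.com/TWTimChen/JHU_Algorithms | Prog2/source/is_interweaving.py | is_interweaving
-- ===== SOURCE A (Python) =====
-- def is_interweaving(s, x, y):
--     lx, ly = len(x), len(y)
--     comparisons = 0
--
--     while (lx + ly) <= len(s):
--         # initialize dp table
--         dp = [[False] * (ly+1) for _ in range(lx+1)]
--
--         for i in range(lx+1):
--             for j in range(ly+1):
--                 # two empty strings have an empty string
--                 # as interleaving
--                 if (i == 0 and j == 0):
--                     dp[i][j] = True
--
--                 # x is empty
--                 elif (i == 0):
--                     if (y[j - 1] == s[j - 1]):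
--                         dp[i][j] = dp[i][j - 1]
--
--                 # y is empty
--                 elif (j == 0):
--                     if (x[i - 1] == s[i - 1]):
--                         dp[i][j] = dp[i - 1][j]
--
--                 # Current character of s matches with
--                 # current character of x, but doesn't match
--                 # with current character of y
--                 elif (x[i - 1] == s[i + j - 1] and
--                     y[j - 1] != s[i + j - 1]):
--                     dp[i][j] = dp[i - 1][j]
--
--                 # Current character of s matches with
--                 # current character of y, but doesn't match
--                 # with current character of x
--                 elif (x[i - 1] != s[i + j - 1] and
--                     y[j - 1] == s[i + j - 1]):
--                     dp[i][j] = dp[i][j - 1]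
--
--                 # Current character of s matches with
--                 # that of both x and y
--                 elif (x[i - 1] == s[i + j - 1] and
--                     y[j - 1] == s[i + j - 1]):
--                     dp[i][j] = (dp[i - 1][j] or dp[i][j - 1])
--         if dp[lx][ly]:
--             return True
--         s = s[1:]
--
--     return False
-- ===== SOURCE B (Python) =====
-- def is_interweaving(s, x, y):
--     # NFA-style set-of-states simulation per window instead of a 2D dp table:
--     # after reading k chars of the window, `states` holds every i such that the
--     # prefix is an interleaving of x[:i] and y[:k-i].
--     lx, ly = len(x), len(y)
--     n = lx + ly
--     while n <= len(s):
--         states = {0}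
--         for k in range(n):
--             c = s[k]
--             nxt = set()
--             for i in states:
--                 if i < lx and x[i] == c:
--                     nxt.add(i + 1)
--                 j = k - i
--                 if j < ly and y[j] == c:
--                     nxt.add(i)
--             states = nxt
--         if lx in states:
--             return True
--         s = s[1:]
--     return False
-- ===== Notes on version B (the rewrite author's own statement) =====
-- stated objective: alternative
-- what changed: Replaced the per-window (lx+1)x(ly+1) bottom-up dp table by a one-pass NFA-style simulation that sweeps the window once, maintaining only the set of split points i with s[:k] an interleaving of x[:i] and y[:k-i].
import Mathlib
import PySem

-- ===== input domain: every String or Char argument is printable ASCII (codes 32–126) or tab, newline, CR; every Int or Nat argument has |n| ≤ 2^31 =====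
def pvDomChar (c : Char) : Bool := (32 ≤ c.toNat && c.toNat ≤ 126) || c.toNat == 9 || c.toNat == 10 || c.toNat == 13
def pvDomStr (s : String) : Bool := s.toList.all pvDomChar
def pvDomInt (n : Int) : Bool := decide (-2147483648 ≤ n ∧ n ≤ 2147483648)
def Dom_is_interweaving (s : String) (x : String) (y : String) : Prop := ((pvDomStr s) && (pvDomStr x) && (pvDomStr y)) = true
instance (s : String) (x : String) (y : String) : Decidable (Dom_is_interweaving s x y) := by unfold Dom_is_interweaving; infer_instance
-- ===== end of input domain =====

-- B replaces A's per-window bottom-up dp table by a one-pass set-of-split-points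
-- (NFA-style) simulation of the window; objective: alternative algorithm, same result.

-- ===== PORT A =====
-- dp[r][c] read; all reads/writes are in range when A runs, so getD's defaults are never used
def pvGetCell (dp : List (List Bool)) (r c : Nat) : Bool := (dp.getD r []).getD c false

-- dp[i][j] = v
def pvUpd (dp : List (List Bool)) (i j : Nat) (v : Bool) : List (List Bool) :=
  dp.set i ((dp.getD i []).set j v)

-- the body of A's double loop: the value assigned to dp[i][j] (False = left unassigned)
def pvCellA (xl yl sl : List Char) (dp : List (List Bool)) (i j : Nat) : Bool :=
  if i = 0 ∧ j = 0 then true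
  else if i = 0 then
    (if yl.getD (j-1) ' ' = sl.getD (j-1) ' ' then pvGetCell dp i (j-1) else false)
  else if j = 0 then
    (if xl.getD (i-1) ' ' = sl.getD (i-1) ' ' then pvGetCell dp (i-1) j else false)
  else
    if xl.getD (i-1) ' ' = sl.getD (i+j-1) ' ' ∧ ¬ (yl.getD (j-1) ' ' = sl.getD (i+j-1) ' ') then
      pvGetCell dp (i-1) j
    else if ¬ (xl.getD (i-1) ' ' = sl.getD (i+j-1) ' ') ∧ yl.getD (j-1) ' ' = sl.getD (i+j-1) ' ' then
      pvGetCell dp i (j-1)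
    else if xl.getD (i-1) ' ' = sl.getD (i+j-1) ' ' ∧ yl.getD (j-1) ' ' = sl.getD (i+j-1) ' ' then
      pvGetCell dp (i-1) j || pvGetCell dp i (j-1)
    else false

-- A's dp-table construction for the current window (row-major double for loop)
def pvDpA (xl yl sl : List Char) : List (List Bool) :=
  (List.range (xl.length+1)).foldl (fun dp i =>
    (List.range (yl.length+1)).foldl (fun dp j => pvUpd dp i j (pvCellA xl yl sl dp i j)) dp)
    (List.replicate (xl.length+1) (List.replicate (yl.length+1) false))

-- A's while loop over shrinking s; fuel = len(s)+1 only makes it total (the guard stops it first)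
def pvWhileA (xl yl : List Char) : Nat → List Char → Bool
  | 0, _ => false
  | fuel+1, sl =>
    if xl.length + yl.length ≤ sl.length then
      if pvGetCell (pvDpA xl yl sl) xl.length yl.length then true
      else pvWhileA xl yl fuel (sl.drop 1)
    else false

def is_interweaving (s : String) (x : String) (y : String) : Bool :=
  pvWhileA x.toList y.toList (s.toList.length + 1) s.toList

-- ===== PORT B =====
-- one step of B's sweep: from the set of split points after k chars to after k+1 chars;
-- members always satisfy i ≤ k, so Nat's `k - i` agrees with Python's `k - i`
-- the body of B's inner `for i in states` loop (two conditional set insertions)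
def pvStepFun (xl yl sl : List Char) (k : Nat) (nxt : PySem.Set Nat) (i : Nat) : PySem.Set Nat :=
  let nxt := if i < xl.length ∧ xl.getD i ' ' = sl.getD k ' ' then PySem.Set.add nxt (i+1) else nxt
  if k - i < yl.length ∧ yl.getD (k-i) ' ' = sl.getD k ' ' then PySem.Set.add nxt i else nxt

def pvStepB (xl yl sl : List Char) (k : Nat) (states : PySem.Set Nat) : PySem.Set Nat :=
  states.foldl (pvStepFun xl yl sl k) PySem.Set.empty

-- B's per-window check: sweep the window once, then test lx ∈ states
def pvWindowB (xl yl sl : List Char) : Bool :=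
  PySem.Set.contains
    ((List.range (xl.length + yl.length)).foldl (fun st k => pvStepB xl yl sl k st)
      (PySem.Set.add PySem.Set.empty 0))
    xl.length

-- B's while loop, same window shifting as A's; fuel only makes it total
def pvWhileB (xl yl : List Char) : Nat → List Char → Bool
  | 0, _ => false
  | fuel+1, sl =>
    if xl.length + yl.length ≤ sl.length then
      if pvWindowB xl yl sl then true
      else pvWhileB xl yl fuel (sl.drop 1)
    else false

def is_interweaving_alt (s : String) (x : String) (y : String) : Bool :=
  pvWhileB x.toList y.toList (s.toList.length + 1) s.toList

-- ===== PRECONDITION & SPEC =====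
def Spec_is_interweaving (s : String) (x : String) (y : String) (out : Bool) : Prop := out = is_interweaving_alt s x y
instance (s : String) (x : String) (y : String) (out : Bool) : Decidable (Spec_is_interweaving s x y out) := by unfold Spec_is_interweaving; infer_instance

-- ===== CLAIM (what is proved, stated in full; the proofs are below) =====
def Claim_equal_is_interweaving : Prop := ∀ (s : String) (x : String) (y : String), Dom_is_interweaving s x y → Spec_is_interweaving s x y (is_interweaving s x y)

-- ===== LEMMAS AND PROOFS =====

-- reference predicate: pvR i j ↔ the window's first i+j chars interleave x[:i] and y[:j],
-- with exactly A's branch structure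
def pvR (xl yl sl : List Char) : Nat → Nat → Bool
  | 0, 0 => true
  | 0, j+1 => if yl.getD j ' ' = sl.getD j ' ' then pvR xl yl sl 0 j else false
  | i+1, 0 => if xl.getD i ' ' = sl.getD i ' ' then pvR xl yl sl i 0 else false
  | i+1, j+1 =>
    if xl.getD i ' ' = sl.getD (i+j+1) ' ' ∧ ¬ (yl.getD j ' ' = sl.getD (i+j+1) ' ') then
      pvR xl yl sl i (j+1)
    else if ¬ (xl.getD i ' ' = sl.getD (i+j+1) ' ') ∧ yl.getD j ' ' = sl.getD (i+j+1) ' ' then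
      pvR xl yl sl (i+1) j
    else if xl.getD i ' ' = sl.getD (i+j+1) ' ' ∧ yl.getD j ' ' = sl.getD (i+j+1) ' ' then
      pvR xl yl sl i (j+1) || pvR xl yl sl (i+1) j
    else false
termination_by i j => i + j

lemma pv_getD_set_self {α : Type} (l : List α) (i : Nat) (a d : α) (h : i < l.length) :
    (l.set i a).getD i d = a := by
  simp [List.getD_eq_getElem?_getD, h]

lemma pv_getD_set_ne {α : Type} (l : List α) (i j : Nat) (a d : α) (h : i ≠ j) :
    (l.set i a).getD j d = l.getD j d := by
  simp [List.getD_eq_getElem?_getD, List.getElem?_set_ne h]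

-- unified recurrence for pvR at total index k+1
lemma pvR_succ (xl yl sl : List Char) (i j k : Nat) (hk : i + j = k + 1) :
    pvR xl yl sl i j =
      ((decide (0 < i) && decide (xl.getD (i-1) ' ' = sl.getD k ' ') && pvR xl yl sl (i-1) j)
       || (decide (0 < j) && decide (yl.getD (j-1) ' ' = sl.getD k ' ') && pvR xl yl sl i (j-1))) := by
  rcases i with _ | i <;> rcases j with _ | j
  · omega
  · have hj : k = j := by omega
    subst hj
    by_cases hy : yl.getD k ' ' = sl.getD k ' ' <;> simp only [pvR] <;> simp [hy]
  · have hi : k = i := by omega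
    subst hi
    by_cases hx : xl.getD k ' ' = sl.getD k ' ' <;> simp only [pvR] <;> simp [hx]
  · have hk' : k = i + j + 1 := by omega
    subst hk'
    by_cases hx : xl.getD i ' ' = sl.getD (i+j+1) ' ' <;>
      by_cases hy : yl.getD j ' ' = sl.getD (i+j+1) ' ' <;>
        simp only [pvR] <;> simp_all

-- the dp invariant: entries in the processed (row-major) region equal pvR, the rest are the initial False
def pvDpOK (xl yl sl : List Char) (dp : List (List Bool)) (i j : Nat) : Prop :=
  dp.length = xl.length + 1 ∧
  (∀ r, r ≤ xl.length → (dp.getD r []).length = yl.length + 1) ∧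
  (∀ r c, r ≤ xl.length → c ≤ yl.length →
    pvGetCell dp r c = if r < i ∨ (r = i ∧ c < j) then pvR xl yl sl r c else false)

lemma pv_cell_correct (xl yl sl : List Char) (dp : List (List Bool)) (i j : Nat)
    (hok : pvDpOK xl yl sl dp i j) (hi : i ≤ xl.length) (hj : j ≤ yl.length) :
    pvCellA xl yl sl dp i j = pvR xl yl sl i j := by
  obtain ⟨-, -, hval⟩ := hok
  rcases i with _ | i <;> rcases j with _ | j
  · simp [pvCellA, pvR]
  · have h1 : pvGetCell dp 0 j = pvR xl yl sl 0 j := by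
      rw [hval 0 j (by omega) (by omega)]; simp
    simp only [pvCellA, pvR]
    simp [h1]
  · have h1 : pvGetCell dp i 0 = pvR xl yl sl i 0 := by
      rw [hval i 0 (by omega) (by omega)]; simp
    simp only [pvCellA, pvR]
    simp [h1]
  · have h1 : pvGetCell dp i (j+1) = pvR xl yl sl i (j+1) := by
      rw [hval i (j+1) (by omega) (by omega)]; simp
    have h2 : pvGetCell dp (i+1) j = pvR xl yl sl (i+1) j := by
      rw [hval (i+1) j (by omega) (by omega)]; simp
    simp only [pvCellA, pvR]
    have e : i + 1 + j = i + j + 1 := by omega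
    simp [h1, h2, e]

lemma pv_upd_step (xl yl sl : List Char) (dp : List (List Bool)) (i j : Nat)
    (hok : pvDpOK xl yl sl dp i j) (hi : i ≤ xl.length) (hj : j ≤ yl.length) :
    pvDpOK xl yl sl (pvUpd dp i j (pvCellA xl yl sl dp i j)) i (j+1) := by
  obtain ⟨hlen, hrow, hval⟩ := hok
  have hilen : i < dp.length := by omega
  have hjlen : j < (dp.getD i []).length := by rw [hrow i hi]; omega
  refine ⟨by simp [pvUpd, hlen], ?_, ?_⟩
  · intro r hr
    by_cases hri : r = i
    · subst hri
      rw [pvUpd, pv_getD_set_self _ _ _ _ hilen, List.length_set]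
      exact hrow r hr
    · rw [pvUpd, pv_getD_set_ne _ _ _ _ _ (fun h => hri h.symm)]
      exact hrow r hr
  · intro r c hr hc
    by_cases hri : r = i
    · subst hri
      by_cases hcj : c = j
      · subst hcj
        rw [pvGetCell, pvUpd, pv_getD_set_self _ _ _ _ hilen,
          pv_getD_set_self _ _ _ _ hjlen]
        rw [pv_cell_correct xl yl sl dp r c ⟨hlen, hrow, hval⟩ hr hc]
        simp
      · have : pvGetCell (pvUpd dp r j (pvCellA xl yl sl dp r j)) r c = pvGetCell dp r c := by
          rw [pvGetCell, pvUpd, pv_getD_set_self _ _ _ _ hilen,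
            pv_getD_set_ne _ _ _ _ _ (fun h => hcj h.symm), pvGetCell]
        rw [this, hval r c hr hc]
        have : (r < r ∨ (r = r ∧ c < j)) ↔ (r < r ∨ (r = r ∧ c < j+1)) := by
          constructor <;> intro h <;> simp_all <;> omega
        by_cases hcb : c < j
        · simp [hcb, Nat.lt_succ_of_lt hcb]
        · have hcb' : ¬ c < j + 1 := by omega
          simp [hcb, hcb']
    · have : pvGetCell (pvUpd dp i j (pvCellA xl yl sl dp i j)) r c = pvGetCell dp r c := by
        rw [pvGetCell, pvUpd, pv_getD_set_ne _ _ _ _ _ (fun h => hri h.symm), pvGetCell]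
      rw [this, hval r c hr hc]
      have : (r < i ∨ (r = i ∧ c < j)) ↔ (r < i ∨ (r = i ∧ c < j+1)) := by
        constructor <;> intro h <;> rcases h with h | h <;> simp_all
      simp only [hri, false_and, or_false]

-- generic invariant lemma for a fold over List.range
lemma pv_foldl_range_inv {α : Type} (P : α → Nat → Prop) (f : α → Nat → α) (n : Nat)
    (step : ∀ a k, k < n → P a k → P (f a k) (k+1)) :
    ∀ a, P a 0 → P ((List.range n).foldl f a) n := by
  induction n with
  | zero => intro a h; simpa using h
  | succ m ih =>
    intro a h
    rw [List.range_succ, List.foldl_append]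
    exact step _ m (Nat.lt_succ_self m)
      (ih (fun a k hk => step a k (Nat.lt_succ_of_lt hk)) a h)

lemma pv_dpOK_shift (xl yl sl : List Char) (dp : List (List Bool)) (i : Nat)
    (h : pvDpOK xl yl sl dp i (yl.length+1)) : pvDpOK xl yl sl dp (i+1) 0 := by
  obtain ⟨hlen, hrow, hval⟩ := h
  refine ⟨hlen, hrow, ?_⟩
  intro r c hr hc
  rw [hval r c hr hc]
  by_cases h1 : r < i ∨ (r = i ∧ c < yl.length + 1)
  · have h2 : r < i + 1 ∨ (r = i + 1 ∧ c < 0) := by omega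
    rw [if_pos h1, if_pos h2]
  · have h2 : ¬ (r < i + 1 ∨ (r = i + 1 ∧ c < 0)) := by omega
    rw [if_neg h1, if_neg h2]

lemma pvDpA_final (xl yl sl : List Char) :
    pvGetCell (pvDpA xl yl sl) xl.length yl.length = pvR xl yl sl xl.length yl.length := by
  have init : pvDpOK xl yl sl
      (List.replicate (xl.length+1) (List.replicate (yl.length+1) false)) 0 0 := by
    refine ⟨by simp, ?_, ?_⟩
    · intro r hr
      rw [List.getD_eq_getElem?_getD, List.getElem?_replicate]
      simp [Nat.lt_succ_of_le hr]
    · intro r c hr hc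
      have e1 : (List.replicate (xl.length+1) (List.replicate (yl.length+1) false)).getD r []
          = List.replicate (yl.length+1) false := by
        rw [List.getD_eq_getElem?_getD, List.getElem?_replicate]
        simp [Nat.lt_succ_of_le hr]
      simp only [pvGetCell, e1]
      rw [List.getD_eq_getElem?_getD, List.getElem?_replicate]
      have h2 : ¬ (r < 0 ∨ (r = 0 ∧ c < 0)) := by omega
      rw [if_neg h2]
      split <;> rfl
  have main : pvDpOK xl yl sl (pvDpA xl yl sl) (xl.length+1) 0 := by
    refine pv_foldl_range_inv (fun dp i => pvDpOK xl yl sl dp i 0) _ _ ?_ _ init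
    intro dp i hi hok
    apply pv_dpOK_shift
    refine pv_foldl_range_inv (fun dp j => pvDpOK xl yl sl dp i j)
      (fun dp j => pvUpd dp i j (pvCellA xl yl sl dp i j)) _ ?_ dp hok
    intro dp j hj hok'
    exact pv_upd_step xl yl sl dp i j hok' (by omega) (by omega)
  obtain ⟨-, -, hval⟩ := main
  rw [hval _ _ (le_refl _) (le_refl _)]
  simp

-- B-side: membership characterisation of one loop-body application
lemma pv_mem_stepFun (xl yl sl : List Char) (k : Nat) (nxt : PySem.Set Nat) (a i' : Nat) :
    i' ∈ pvStepFun xl yl sl k nxt a ↔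
      i' ∈ nxt ∨ ((a < xl.length ∧ xl.getD a ' ' = sl.getD k ' ') ∧ i' = a + 1)
        ∨ ((k - a < yl.length ∧ yl.getD (k-a) ' ' = sl.getD k ' ') ∧ i' = a) := by
  by_cases h1 : a < xl.length ∧ xl.getD a ' ' = sl.getD k ' ' <;>
    by_cases h2 : k - a < yl.length ∧ yl.getD (k-a) ' ' = sl.getD k ' ' <;>
      (simp only [pvStepFun, h1, h2, and_self, if_true, if_false, true_and, false_and,
        PySem.Set.mem_add] ; tauto)

-- B-side: membership characterisation of one sweep step
lemma pv_mem_stepB (xl yl sl : List Char) (k : Nat) (st : PySem.Set Nat) (i' : Nat) :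
    i' ∈ pvStepB xl yl sl k st ↔
      ∃ i ∈ st, ((i < xl.length ∧ xl.getD i ' ' = sl.getD k ' ') ∧ i' = i + 1)
        ∨ ((k - i < yl.length ∧ yl.getD (k-i) ' ' = sl.getD k ' ') ∧ i' = i) := by
  rw [pvStepB]
  suffices h : ∀ (l : List Nat) (acc : PySem.Set Nat),
      (i' ∈ l.foldl (pvStepFun xl yl sl k) acc
      ↔ i' ∈ acc ∨ ∃ i ∈ l, ((i < xl.length ∧ xl.getD i ' ' = sl.getD k ' ') ∧ i' = i + 1)
        ∨ ((k - i < yl.length ∧ yl.getD (k-i) ' ' = sl.getD k ' ') ∧ i' = i)) by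
    rw [h st PySem.Set.empty]
    simp [PySem.Set.empty]
  intro l
  induction l with
  | nil => intro acc; simp
  | cons a l ih =>
    intro acc
    rw [List.foldl_cons, ih, pv_mem_stepFun]
    constructor
    · rintro ((h | h | h) | ⟨i, hi, hh⟩)
      · exact Or.inl h
      · exact Or.inr ⟨a, List.mem_cons_self, Or.inl h⟩
      · exact Or.inr ⟨a, List.mem_cons_self, Or.inr h⟩
      · exact Or.inr ⟨i, List.mem_cons_of_mem a hi, hh⟩
    · rintro (h | ⟨i, hi, hh⟩)
      · exact Or.inl (Or.inl h)
      · rcases List.mem_cons.mp hi with rfl | hi'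
        · rcases hh with h | h
          · exact Or.inl (Or.inr (Or.inl h))
          · exact Or.inl (Or.inr (Or.inr h))
        · exact Or.inr ⟨i, hi', hh⟩

-- B-side: the set after k steps is exactly the set of valid split points for the k-prefix
lemma pv_states_mem (xl yl sl : List Char) :
    ∀ (k : Nat) (i' : Nat),
      i' ∈ (List.range k).foldl (fun st k => pvStepB xl yl sl k st) (PySem.Set.add PySem.Set.empty 0) ↔
      (i' ≤ k ∧ i' ≤ xl.length ∧ k - i' ≤ yl.length ∧ pvR xl yl sl i' (k - i') = true) := by
  intro k
  induction k with
  | zero =>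
    intro i'
    simp only [List.range_zero, List.foldl_nil]
    have he : PySem.Set.add PySem.Set.empty 0 = [0] := rfl
    rw [he]
    simp only [List.mem_singleton]
    constructor
    · rintro rfl; exact ⟨le_refl _, by omega, by omega, by simp [pvR]⟩
    · rintro ⟨h, -⟩; omega
  | succ k ih =>
    intro i'
    rw [List.range_succ, List.foldl_append, List.foldl_cons, List.foldl_nil, pv_mem_stepB]
    constructor
    · rintro ⟨i, hmem, h | h⟩
      · obtain ⟨⟨hlt, hx⟩, rfl⟩ := h
        obtain ⟨hik, hilx, hkiy, hR⟩ := (ih i).mp hmem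
        refine ⟨by omega, by omega, by omega, ?_⟩
        rw [pvR_succ xl yl sl (i+1) (k+1-(i+1)) k (by omega)]
        have e1 : k + 1 - (i + 1) = k - i := by omega
        have e2 : i + 1 - 1 = i := by omega
        rw [e1, e2, decide_eq_true hx, hR]
        simp
      · obtain ⟨⟨hlt, hy⟩, rfl⟩ := h
        obtain ⟨hik, hilx, hkiy, hR⟩ := (ih i').mp hmem
        refine ⟨by omega, by omega, by omega, ?_⟩
        rw [pvR_succ xl yl sl i' (k+1-i') k (by omega)]
        have h1 : k + 1 - i' - 1 = k - i' := by omega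
        have h2 : (0:Nat) < k + 1 - i' := by omega
        rw [h1, decide_eq_true hy, hR, decide_eq_true h2]
        simp
    · rintro ⟨hik, hilx, hkiy, hR⟩
      rw [pvR_succ xl yl sl i' (k+1-i') k (by omega)] at hR
      rcases Bool.or_eq_true_iff.mp hR with h | h
      · simp only [Bool.and_eq_true, decide_eq_true_eq] at h
        obtain ⟨⟨hpos, hx⟩, hR'⟩ := h
        refine ⟨i'-1, (ih (i'-1)).mpr ⟨by omega, by omega, by omega, ?_⟩,
          Or.inl ⟨⟨by omega, ?_⟩, by omega⟩⟩
        · have e : k - (i'-1) = k+1-i' := by omega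
          rw [e]; exact hR'
        · exact hx
      · simp only [Bool.and_eq_true, decide_eq_true_eq] at h
        obtain ⟨⟨hpos, hy⟩, hR'⟩ := h
        refine ⟨i', (ih i').mpr ⟨by omega, by omega, by omega, ?_⟩,
          Or.inr ⟨⟨by omega, ?_⟩, rfl⟩⟩
        · have e : k - i' = k+1-i'-1 := by omega
          rw [e]; exact hR'
        · have e : k - i' = k+1-i'-1 := by omega
          rw [e]; exact hy

lemma pvWindowB_eq (xl yl sl : List Char) :
    pvWindowB xl yl sl = pvR xl yl sl xl.length yl.length := by
  have h : pvWindowB xl yl sl = true ↔ pvR xl yl sl xl.length yl.length = true := by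
    rw [pvWindowB, PySem.Set.contains_iff, pv_states_mem]
    constructor
    · rintro ⟨-, -, -, h⟩
      have : xl.length + yl.length - xl.length = yl.length := by omega
      rwa [this] at h
    · intro h
      refine ⟨by omega, le_refl _, by omega, ?_⟩
      have : xl.length + yl.length - xl.length = yl.length := by omega
      rwa [this]
  cases hb : pvR xl yl sl xl.length yl.length
  · cases hw : pvWindowB xl yl sl
    · rfl
    · exact absurd (h.mp hw) (by simp [hb])
  · exact h.mpr hb

lemma pvWhile_eq (xl yl : List Char) :
    ∀ (fuel : Nat) (sl : List Char), pvWhileA xl yl fuel sl = pvWhileB xl yl fuel sl := by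
  intro fuel
  induction fuel with
  | zero => intro sl; rfl
  | succ f ih =>
    intro sl
    rw [pvWhileA, pvWhileB, pvDpA_final, pvWindowB_eq, ih]

-- ===== VERDICT (by name: the statement is the Claim_ definition above) =====
theorem is_interweaving_spec : Claim_equal_is_interweaving := by
  intro s x y _
  unfold Spec_is_interweaving is_interweaving is_interweaving_alt
  exact pvWhile_eq _ _ _ _
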